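-- pv_equiv track=rewrite | github.com/OneHotTake/frugality | frugality.py | get_model_display_name
-- ===== SOURCE A (Python) =====
-- PROVIDER_PREFIXES = {
--     "nvidia": "nvidia_nim",
--     "openrouter": "open_router",
--     "groq": "groq",
--     "cerebras": "cerebras",
--     "sambanova": "sambanova",
--     "mistral": "mistral",
--     "fireworks": "fireworks",
--     "together": "together",
--     "deepinfra": "deepinfra",
--     "huggingface": "huggingface",
--     "perplexity": "perplexity",
--     "google": "google",
--     "zai": "zai",
--     "hyperbolic": "hyperbolic",
--     "siliconflow": "siliconflow",
--     "scaleway": "scaleway",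
--     "qwen": "qwen",
--     "iflow": "iflow",
-- }
--
-- def get_model_display_name(model_id):
--     """Get clean display name for model."""
--     # Remove provider prefix
--     for prefix in PROVIDER_PREFIXES.values():
--         if model_id.startswith(prefix + "/"):
--             model_id = model_id[len(prefix + "/"):]
--             break
--
--     # Clean up common naming patterns
--     model_id = model_id.replace(":free", "")
--     model_id = model_id.replace("-instruct", "")
--     model_id = model_id.replace("-chat", "")
--
--     # Split on / and take last part
--     return model_id.split("/")[-1]
-- ===== SOURCE B (Python) =====
-- def get_model_display_name(model_id):
--     """Get clean display name for model."""
--     # Stripping a leading "provider/" prefix can never change the final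
--     # segment, and none of the removed patterns contain "/", so the prefix
--     # loop is unnecessary: clean the whole id, then keep the last segment.
--     for pat in (":free", "-instruct", "-chat"):
--         model_id = model_id.replace(pat, "")
--     return model_id.split("/")[-1]
-- ===== Notes on version B (the rewrite author's own statement) =====
-- stated objective: simpler
-- what changed: B deletes A's 18-prefix matching loop entirely: the final split on slash keeps only the last segment, which a stripped leading provider prefix can never reach, and none of the removed patterns (:free, -instruct, -chat) contain a slash, so B just applies the three replaces to the whole id and returns the last segment.
import Mathlib
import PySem

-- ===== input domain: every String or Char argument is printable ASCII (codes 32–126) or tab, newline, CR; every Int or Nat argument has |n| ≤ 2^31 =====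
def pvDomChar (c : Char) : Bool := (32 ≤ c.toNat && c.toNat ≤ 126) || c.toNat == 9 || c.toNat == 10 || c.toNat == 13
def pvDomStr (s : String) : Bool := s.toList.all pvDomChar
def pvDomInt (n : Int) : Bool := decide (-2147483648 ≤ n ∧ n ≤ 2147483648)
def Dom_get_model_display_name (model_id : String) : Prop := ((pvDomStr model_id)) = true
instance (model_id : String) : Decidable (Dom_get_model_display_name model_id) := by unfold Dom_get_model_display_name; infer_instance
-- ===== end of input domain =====

-- B drops A's provider-prefix loop entirely (stripping a leading "provider/" never changes the
-- last '/'-segment and no cleaned pattern contains '/'); objective: simpler, same cost.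

-- ===== PORT A =====
-- PROVIDER_PREFIXES.values() in dict insertion order, as char lists
def pvPrefixesA : List (List Char) :=
  [['n','v','i','d','i','a','_','n','i','m'], ['o','p','e','n','_','r','o','u','t','e','r'],
   ['g','r','o','q'], ['c','e','r','e','b','r','a','s'], ['s','a','m','b','a','n','o','v','a'],
   ['m','i','s','t','r','a','l'], ['f','i','r','e','w','o','r','k','s'],
   ['t','o','g','e','t','h','e','r'], ['d','e','e','p','i','n','f','r','a'],
   ['h','u','g','g','i','n','g','f','a','c','e'], ['p','e','r','p','l','e','x','i','t','y'],
   ['g','o','o','g','l','e'], ['z','a','i'], ['h','y','p','e','r','b','o','l','i','c'],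
   ['s','i','l','i','c','o','n','f','l','o','w'], ['s','c','a','l','e','w','a','y'],
   ['q','w','e','n'], ['i','f','l','o','w']]

-- the 'for prefix in …: if model_id.startswith(prefix+"/"): model_id = model_id[len(prefix+"/"):]; break' loop
def pvStripLoopA : List (List Char) → List Char → List Char
  | [], m => m
  | p :: ps, m =>
    if PySem.Chars.startswith m (p ++ ['/']) then
      PySem.Chars.slice m (some (PySem.Chars.len (p ++ ['/']))) none
    else pvStripLoopA ps m

def get_model_display_name (model_id : String) : String :=
  let m := pvStripLoopA pvPrefixesA model_id.toList
  let m := PySem.Chars.replace m [':','f','r','e','e'] []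
  let m := PySem.Chars.replace m ['-','i','n','s','t','r','u','c','t'] []
  let m := PySem.Chars.replace m ['-','c','h','a','t'] []
  -- split("/")[-1]; the split result is never empty, so the [-1] lookup always succeeds
  String.ofList ((PySem.List.pyGet? (PySem.Chars.splitOn m ['/']) (-1)).getD [])

-- ===== PORT B =====
-- 'for pat in (":free", "-instruct", "-chat"): model_id = model_id.replace(pat, "")'
def pvCleanLoopB : List (List Char) → List Char → List Char
  | [], m => m
  | p :: ps, m => pvCleanLoopB ps (PySem.Chars.replace m p [])

def get_model_display_name_alt (model_id : String) : String :=
  let m := pvCleanLoopB [[':','f','r','e','e'], ['-','i','n','s','t','r','u','c','t'], ['-','c','h','a','t']]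
             model_id.toList
  String.ofList ((PySem.List.pyGet? (PySem.Chars.splitOn m ['/']) (-1)).getD [])

-- ===== PRECONDITION & SPEC =====
def Spec_get_model_display_name (model_id : String) (out : String) : Prop := out = get_model_display_name_alt model_id
instance (model_id : String) (out : String) : Decidable (Spec_get_model_display_name model_id out) := by unfold Spec_get_model_display_name; infer_instance

-- ===== CLAIM (what is proved, stated in full; the proofs are below) =====
def Claim_equal_get_model_display_name : Prop := ∀ (model_id : String), Dom_get_model_display_name model_id → Spec_get_model_display_name model_id (get_model_display_name model_id)

-- ===== LEMMAS AND PROOFS =====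

-- simple structural model of replace(·, a::q, "")
def pvRep (a : Char) (q : List Char) : List Char → List Char
  | [] => []
  | c :: t => if (a :: q).isPrefixOf (c :: t) then pvRep a q (t.drop q.length) else c :: pvRep a q t
  termination_by l => l.length
  decreasing_by all_goals simp

-- simple structural model of split on '/'
def pvSp : List Char → List (List Char)
  | [] => [[]]
  | c :: t => if c = '/' then [] :: pvSp t else (pvSp t).modifyHead (c :: ·)

lemma go_rep (a : Char) (q : List Char) : ∀ (fuel : ℕ) (l acc : List Char), l.length ≤ fuel →
    PySem.Chars.replace.go (a :: q) [] fuel l acc = acc.reverse ++ pvRep a q l := by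
  intro fuel
  induction fuel with
  | zero =>
    intro l acc h
    have : l = [] := by simpa using h
    subst this
    simp [PySem.Chars.replace.go, pvRep]
  | succ n ih =>
    intro l acc h
    match l with
    | [] => simp [PySem.Chars.replace.go, pvRep]
    | c :: t =>
      rw [PySem.Chars.replace.go]
      by_cases hp : (a :: q).isPrefixOf (c :: t)
      · rw [if_pos hp]
        have hlen : (List.drop (a :: q).length (c :: t)).length ≤ n := by
          simp at h ⊢; omega
        rw [ih _ _ hlen]
        rw [pvRep, if_pos hp]
        simp
      · rw [if_neg hp, ih _ _ (by simp at h ⊢; omega)]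
        rw [pvRep, if_neg hp]
        simp

lemma rep_eq (a : Char) (q : List Char) (l : List Char) :
    PySem.Chars.replace l (a :: q) [] = pvRep a q l := by
  rw [PySem.Chars.replace]
  simp [go_rep a q l.length l [] le_rfl]

lemma pvRep_cons (a : Char) (q : List Char) (c : Char) (t : List Char) :
    pvRep a q (c :: t) = if (a :: q).isPrefixOf (c :: t) then pvRep a q (t.drop q.length)
      else c :: pvRep a q t := by
  rw [pvRep]

lemma go_sp : ∀ (fuel : ℕ) (l cur : List Char) (acc : List (List Char)), l.length < fuel →
    PySem.Chars.splitOn.go ['/'] fuel l cur acc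
      = acc.reverse ++ (pvSp l).modifyHead (cur.reverse ++ ·) := by
  intro fuel
  induction fuel with
  | zero => intro l cur acc h; omega
  | succ n ih =>
    intro l cur acc h
    match l with
    | [] => simp [PySem.Chars.splitOn.go, pvSp]
    | c :: t =>
      rw [PySem.Chars.splitOn.go]
      by_cases hc : c = '/'
      · subst hc
        have hp : (['/'] : List Char).isPrefixOf ('/' :: t) = true := by simp
        rw [if_pos hp]
        simp only [List.length_cons] at h
        rw [ih _ _ _ (by simp; omega)]
        simp [pvSp]
        cases pvSp t <;> simp
      · have hp : (['/'] : List Char).isPrefixOf (c :: t) = false := by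
          simp [List.isPrefixOf]
          intro h
          exact absurd h.symm hc
        simp only [hp, Bool.false_eq_true, if_false]
        rw [ih _ _ _ (by simp at h; omega)]
        rw [pvSp, if_neg hc, List.modifyHead_modifyHead]
        have hf : (fun x : List Char => (c :: cur).reverse ++ x)
            = ((fun x : List Char => cur.reverse ++ x) ∘ fun x => c :: x) := by
          funext x; simp
        rw [hf]

lemma sp_eq (l : List Char) : PySem.Chars.splitOn l ['/'] = pvSp l := by
  rw [PySem.Chars.splitOn]
  rw [go_sp (l.length + 1) l [] [] (by omega)]
  cases pvSp l <;> simp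

lemma pvSp_ne_nil (l : List Char) : pvSp l ≠ [] := by
  induction l with
  | nil => rw [pvSp]; simp
  | cons c t ih =>
    rw [pvSp]
    split_ifs
    · simp
    · cases h : pvSp t with
      | nil => exact absurd h ih
      | cons a b => simp

lemma pvSp_append (u v : List Char) : pvSp (u ++ '/' :: v) = pvSp u ++ pvSp v := by
  induction u with
  | nil => simp [pvSp]
  | cons c u' ih =>
    by_cases hc : c = '/'
    · subst hc
      simp [pvSp, ih]
    · simp only [List.cons_append]
      rw [pvSp, if_neg hc, pvSp, if_neg hc, ih]
      cases h : pvSp u' with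
      | nil => exact absurd h (pvSp_ne_nil u')
      | cons a b => simp

lemma getLast?_pvSp_append (u v : List Char) :
    (pvSp (u ++ '/' :: v)).getLast? = (pvSp v).getLast? := by
  rw [pvSp_append, List.getLast?_append]
  cases h : pvSp v with
  | nil => exact absurd h (pvSp_ne_nil v)
  | cons a b => rw [List.getLast?_cons]; simp

-- a pattern without '/' that is a prefix of u ++ '/' :: v is a prefix of u
lemma prefix_no_slash : ∀ (p u v : List Char), '/' ∉ p → p <+: u ++ '/' :: v → p <+: u := by
  intro p
  induction p with
  | nil => intro u v _ _; exact List.nil_prefix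
  | cons x p' ih =>
    intro u v hm hp
    cases u with
    | nil =>
      rw [List.nil_append, List.cons_prefix_cons] at hp
      exact absurd (by rw [hp.1]; exact List.mem_cons_self) hm
    | cons b u' =>
      rw [List.cons_append, List.cons_prefix_cons] at hp
      rw [List.cons_prefix_cons]
      exact ⟨hp.1, ih u' v (fun h => hm (List.mem_cons_of_mem _ h)) hp.2⟩

-- replace on a pattern without '/' distributes over the last '/'
lemma pvRep_append (a : Char) (q : List Char) (hm : '/' ∉ a :: q) :
    ∀ (n : ℕ) (u : List Char), u.length ≤ n → ∀ (v : List Char),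
      pvRep a q (u ++ '/' :: v) = pvRep a q u ++ '/' :: pvRep a q v := by
  intro n
  induction n with
  | zero =>
    intro u hu v
    have : u = [] := by simpa using hu
    subst this
    have hnp : ¬ (a :: q).isPrefixOf ('/' :: v) = true := by
      intro h
      have := (List.isPrefixOf_iff_prefix.mp h)
      rw [List.cons_prefix_cons] at this
      exact hm (this.1 ▸ List.mem_cons_self)
    simp only [List.nil_append]
    rw [pvRep_cons, if_neg hnp]
    rw [show pvRep a q [] = [] from by rw [pvRep]]
    simp
  | succ n ih =>
    intro u hu v
    cases u with
    | nil => exact ih [] (by simp) v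
    | cons c u' =>
      by_cases hp : (a :: q).isPrefixOf (c :: u' ++ '/' :: v)
      · have hpre : (a :: q) <+: (c :: u') := by
          refine prefix_no_slash (a :: q) (c :: u') v hm ?_
          simpa using List.isPrefixOf_iff_prefix.mp hp
        have hlen : q.length ≤ u'.length := by
          have := hpre.length_le
          simp at this
          omega
        have hp' : (a :: q).isPrefixOf (c :: u') := List.isPrefixOf_iff_prefix.mpr hpre
        simp only [List.cons_append]
        rw [pvRep_cons a q c (u' ++ '/' :: v), if_pos (by simpa using hp), pvRep_cons a q c u', if_pos hp']
        rw [List.drop_append_of_le_length hlen]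
        exact ih _ (by simp at hu ⊢; omega) v
      · have hp' : ¬ (a :: q).isPrefixOf (c :: u') := by
          intro h
          exact hp (List.isPrefixOf_iff_prefix.mpr
            (((List.isPrefixOf_iff_prefix.mp h)).trans (by simp)))
        simp only [List.cons_append]
        rw [pvRep_cons a q c (u' ++ '/' :: v), if_neg (by simpa using hp), pvRep_cons a q c u', if_neg hp']
        rw [ih u' (by simp at hu; omega) v]
        simp

-- the three cleaning patterns, composed
def pvClean (m : List Char) : List Char :=
  pvRep '-' ['c','h','a','t'] (pvRep '-' ['i','n','s','t','r','u','c','t'] (pvRep ':' ['f','r','e','e'] m))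

lemma pvClean_append (u v : List Char) :
    pvClean (u ++ '/' :: v) = pvClean u ++ '/' :: pvClean v := by
  unfold pvClean
  rw [pvRep_append ':' ['f','r','e','e'] (by decide) u.length u le_rfl v]
  rw [pvRep_append '-' ['i','n','s','t','r','u','c','t'] (by decide) _ _ le_rfl]
  rw [pvRep_append '-' ['c','h','a','t'] (by decide) _ _ le_rfl]

-- the quantity both programs finally return (as a char-list option)
def pvLastSeg (m : List Char) : Option (List Char) := (pvSp (pvClean m)).getLast?

lemma pvLastSeg_drop_prefix (p m : List Char) (hm : PySem.Chars.startswith m (p ++ ['/']) = true) :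
    pvLastSeg (m.drop (p.length + 1)) = pvLastSeg m := by
  have hpre : (p ++ ['/']) <+: m := PySem.Chars.startswith_iff _ _ |>.mp hm
  obtain ⟨rest, hrest⟩ := hpre
  have hm' : m = p ++ '/' :: rest := by rw [← hrest]; simp
  have hdrop : m.drop (p.length + 1) = rest := by
    rw [hm']
    rw [show p.length + 1 = (p ++ ['/']).length by simp]
    rw [show p ++ '/' :: rest = (p ++ ['/']) ++ rest by simp]
    simp
  rw [hdrop, hm']
  unfold pvLastSeg
  rw [pvClean_append, getLast?_pvSp_append]

lemma pvLastSeg_stripLoop (ps : List (List Char)) (m : List Char) :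
    pvLastSeg (pvStripLoopA ps m) = pvLastSeg m := by
  induction ps with
  | nil => rfl
  | cons p ps ih =>
    rw [pvStripLoopA]
    split_ifs with h
    · rw [PySem.Chars.slice_eq_listSlice, PySem.List.slice_from _ (by rw [PySem.Chars.len_eq]; exact Int.natCast_nonneg _)]
      have : ((PySem.Chars.len (p ++ ['/']) : Int)).toNat = p.length + 1 := by
        simp [PySem.Chars.len_eq]
      rw [this]
      exact pvLastSeg_drop_prefix p m h
    · exact ih

lemma pyGet_neg_one (l : List (List Char)) (h : l ≠ []) :
    PySem.List.pyGet? l (-1) = l.getLast? := by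
  have hl : 0 < l.length := List.length_pos_iff.mpr h
  have h2 : -(l.length : Int) ≤ -1 := by omega
  simp [PySem.List.pyGet?, PySem.List.pyIdx?, h2, List.getLast?_eq_getElem?]

-- both ports compute ofList of (pvLastSeg …).getD []
lemma port_shape (m : List Char) :
    (PySem.List.pyGet? (PySem.Chars.splitOn (pvClean m) ['/']) (-1)).getD [] = (pvLastSeg m).getD [] := by
  rw [sp_eq, pyGet_neg_one _ (pvSp_ne_nil _)]
  rfl

-- ===== VERDICT (by name: the statement is the Claim_ definition above) =====
theorem get_model_display_name_spec : Claim_equal_get_model_display_name := by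
  intro model_id _
  unfold Spec_get_model_display_name get_model_display_name get_model_display_name_alt
  simp only [pvCleanLoopB, rep_eq]
  have hclean : ∀ x, pvRep '-' ['c','h','a','t'] (pvRep '-' ['i','n','s','t','r','u','c','t'] (pvRep ':' ['f','r','e','e'] x)) = pvClean x := fun _ => rfl
  simp only [hclean]
  rw [port_shape, port_shape, pvLastSeg_stripLoop]
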